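-- pv_equiv track=rewrite | github.com/AvivYunker/PROJECTS | PYTHON/Programs-With-Functions/prints all digit combinations (+ max sort - added convenience).py | array_to_number_LtoS
-- ===== SOURCE A (Python) =====
-- def array_to_number_LtoS (arr, num):
--     num = int(0)
--     lim = len(arr)
--     level = int(1)
--     for cnt in range(0, lim, 1):
--         num = int(num + level * int(arr[cnt]))
--         level = int(level * 10)
--     return num
-- ===== SOURCE B (Python) =====
-- def array_to_number_LtoS(arr, num):
--     # Horner's method over the reversed array: most-significant digit first.
--     acc = 0
--     for d in reversed(arr):
--         acc = acc * 10 + int(d)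
--     return acc
-- ===== Notes on version B (the rewrite author's own statement) =====
-- stated objective: simpler
-- what changed: Replaces the place-value accumulation with a separate power-of-ten multiplier by Horner's method over the reversed list (acc = acc*10 + d), eliminating the level variable.
import Mathlib
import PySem

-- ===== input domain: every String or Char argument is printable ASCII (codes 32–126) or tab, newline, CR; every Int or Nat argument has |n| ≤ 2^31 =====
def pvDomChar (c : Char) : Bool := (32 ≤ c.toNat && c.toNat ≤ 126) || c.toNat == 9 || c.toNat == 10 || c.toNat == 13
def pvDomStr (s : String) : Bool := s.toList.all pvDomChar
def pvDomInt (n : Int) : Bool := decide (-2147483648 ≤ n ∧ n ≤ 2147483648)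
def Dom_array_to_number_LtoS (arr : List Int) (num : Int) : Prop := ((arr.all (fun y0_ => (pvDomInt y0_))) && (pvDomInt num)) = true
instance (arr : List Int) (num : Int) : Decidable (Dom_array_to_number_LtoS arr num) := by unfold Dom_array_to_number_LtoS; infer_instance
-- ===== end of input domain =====

-- B replaces A's place-value sum (with a separate power-of-ten multiplier) by Horner's
-- method over the reversed list; objective: simpler.

-- ===== PORT A =====
-- A: num := 0; level := 1; for each element d: num := num + level*d; level := level*10.
def array_to_number_LtoS (arr : List Int) (_num : Int) : Int :=
  (arr.foldl (fun (st : Int × Int) d => (st.1 + st.2 * d, st.2 * 10)) (0, 1)).1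

-- ===== PORT B =====
-- B: acc := 0; for d in reversed(arr): acc := acc*10 + d.
def array_to_number_LtoS_alt (arr : List Int) (_num : Int) : Int :=
  arr.reverse.foldl (fun acc d => acc * 10 + d) 0

-- ===== PRECONDITION & SPEC =====
def Spec_array_to_number_LtoS (arr : List Int) (num : Int) (out : Int) : Prop := out = array_to_number_LtoS_alt arr num
instance (arr : List Int) (num : Int) (out : Int) : Decidable (Spec_array_to_number_LtoS arr num out) := by unfold Spec_array_to_number_LtoS; infer_instance

-- ===== CLAIM (what is proved, stated in full; the proofs are below) =====
def Claim_equal_array_to_number_LtoS : Prop := ∀ (arr : List Int) (num : Int), Dom_array_to_number_LtoS arr num → Spec_array_to_number_LtoS arr num (array_to_number_LtoS arr num)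

-- ===== LEMMAS AND PROOFS =====

-- A's fold from state (n, l) yields n + l * (value of arr read least-significant-first).
theorem pv_foldA (arr : List Int) (n l : Int) :
    (arr.foldl (fun (st : Int × Int) d => (st.1 + st.2 * d, st.2 * 10)) (n, l)).1
      = n + l * arr.foldr (fun d acc => acc * 10 + d) 0 := by
  induction arr generalizing n l with
  | nil => simp
  | cons d t ih => simp [List.foldl, List.foldr, ih]; ring

-- ===== VERDICT (by name: the statement is the Claim_ definition above) =====
theorem array_to_number_LtoS_spec : Claim_equal_array_to_number_LtoS := by
  intro arr num _
  unfold Spec_array_to_number_LtoS array_to_number_LtoS array_to_number_LtoS_alt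
  rw [List.foldl_reverse, pv_foldA]
  simp
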